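-- pv_equiv track=rewrite | github.com/pypi-data/pypi-mirror-402 | packages/coden-retriever/coden_retriever-1.2.0-py3-none-any.whl/coden_retriever/mcp/flag_insertion.py | _find_decorator_start
-- ===== SOURCE A (Python) =====
-- def _find_decorator_start(lines: list[str], func_start_idx: int) -> int:
--     """Find the start of decorators above a function."""
--     idx = func_start_idx
--     while idx > 0:
--         prev_line = lines[idx - 1].strip()
--         if prev_line.startswith("@"):
--             idx -= 1
--         elif prev_line == "":
--             # Check if there's a decorator before blank lines
--             test_idx = idx - 1
--             while test_idx > 0 and lines[test_idx - 1].strip() == "":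
--                 test_idx -= 1
--             if test_idx > 0 and lines[test_idx - 1].strip().startswith("@"):
--                 idx = test_idx
--             else:
--                 break
--         else:
--             break
--     return idx
-- ===== SOURCE B (Python) =====
-- def _find_decorator_start(lines: list[str], func_start_idx: int) -> int:
--     """Find the start of decorators above a function (single upward pass)."""
--     result = func_start_idx
--     i = func_start_idx
--     while i > 0:
--         line = lines[i - 1].strip()
--         if line.startswith("@"):
--             i -= 1
--             result = i
--         elif line == "":
--             i -= 1
--         else:
--             break
--     return result
-- ===== Notes on version B (the rewrite author's own statement) =====
-- stated objective: simpler
-- what changed: Replaced A's nested blank-run lookahead (inner while scanning ahead over blanks plus a conditional jump of idx) by a single upward loop that skips blanks freely and tracks the topmost decorator index seen in an accumulator.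
import Mathlib
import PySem

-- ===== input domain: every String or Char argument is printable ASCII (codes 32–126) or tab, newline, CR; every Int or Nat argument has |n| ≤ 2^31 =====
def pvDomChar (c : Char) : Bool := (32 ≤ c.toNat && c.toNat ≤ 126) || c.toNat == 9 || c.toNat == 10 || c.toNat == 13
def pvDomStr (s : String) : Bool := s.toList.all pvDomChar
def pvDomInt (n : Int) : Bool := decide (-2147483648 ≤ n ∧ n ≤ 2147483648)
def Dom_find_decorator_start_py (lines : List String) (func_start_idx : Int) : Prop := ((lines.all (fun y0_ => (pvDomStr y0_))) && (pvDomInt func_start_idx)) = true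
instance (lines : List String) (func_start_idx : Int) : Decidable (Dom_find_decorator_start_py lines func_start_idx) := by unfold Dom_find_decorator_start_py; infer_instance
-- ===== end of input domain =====

-- B replaces A's nested blank-run lookahead by one upward pass tracking the topmost decorator seen (objective: simpler).

-- ===== PORT A =====
-- inner while: test_idx > 0 and lines[test_idx - 1].strip() == "" → test_idx -= 1
def pvSkipBlanksA (lines : List String) (t : Int) : Int :=
  if _h : t > 0 ∧ PySem.Str.strip (PySem.List.pyGetD lines (t - 1) "") = "" then
    pvSkipBlanksA lines (t - 1)
  else t
termination_by t.toNat
decreasing_by omega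

-- needed by pvLoopA's decreasing_by
theorem pvSkipBlanksA_le (lines : List String) (t : Int) : pvSkipBlanksA lines t ≤ t := by
  induction hn : t.toNat using Nat.strong_induction_on generalizing t with
  | _ n IH =>
    rw [pvSkipBlanksA]
    split
    · next h => have := IH (t - 1).toNat (by omega) (t - 1) rfl; omega
    · omega

-- outer while of A
def pvLoopA (lines : List String) (idx : Int) : Int :=
  if _h : idx > 0 then
    let prev_line := PySem.Str.strip (PySem.List.pyGetD lines (idx - 1) "")
    if PySem.Str.startswith prev_line "@" then
      pvLoopA lines (idx - 1)
    else if prev_line = "" then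
      let test_idx := pvSkipBlanksA lines (idx - 1)
      if test_idx > 0 ∧ PySem.Str.startswith (PySem.Str.strip (PySem.List.pyGetD lines (test_idx - 1) "")) "@" then
        pvLoopA lines test_idx
      else idx
    else idx
  else idx
termination_by idx.toNat
decreasing_by
  · omega
  · have : pvSkipBlanksA lines (idx - 1) ≤ idx - 1 := pvSkipBlanksA_le lines (idx - 1)
    omega

def find_decorator_start_py (lines : List String) (func_start_idx : Int) : Int :=
  pvLoopA lines func_start_idx

-- ===== PORT B =====
-- B's single loop: result tracks the topmost decorator index seen so far
def pvLoopB (lines : List String) (i result : Int) : Int :=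
  if _h : i > 0 then
    let line := PySem.Str.strip (PySem.List.pyGetD lines (i - 1) "")
    if PySem.Str.startswith line "@" then
      pvLoopB lines (i - 1) (i - 1)
    else if line = "" then
      pvLoopB lines (i - 1) result
    else result
  else result
termination_by i.toNat
decreasing_by all_goals omega

def find_decorator_start_py_alt (lines : List String) (func_start_idx : Int) : Int :=
  pvLoopB lines func_start_idx func_start_idx

-- ===== PRECONDITION & SPEC =====
-- Python A (and B) raises IndexError when func_start_idx > len(lines): the first access lines[func_start_idx-1] is out of range.
def Pre_find_decorator_start_py (lines : List String) (func_start_idx : Int) : Prop :=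
  func_start_idx ≤ (lines.length : Int)
instance (lines : List String) (func_start_idx : Int) : Decidable (Pre_find_decorator_start_py lines func_start_idx) := by unfold Pre_find_decorator_start_py; infer_instance

def pvWitness_find_decorator_start_py : List String × Int := (["@a", "def f():"], 1)

def Spec_find_decorator_start_py (lines : List String) (func_start_idx : Int) (out : Int) : Prop := out = find_decorator_start_py_alt lines func_start_idx
instance (lines : List String) (func_start_idx : Int) (out : Int) : Decidable (Spec_find_decorator_start_py lines func_start_idx out) := by unfold Spec_find_decorator_start_py; infer_instance

-- ===== CLAIM (what is proved, stated in full; the proofs are below) =====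
def Claim_equal_find_decorator_start_py : Prop := ∀ (lines : List String) (func_start_idx : Int), Dom_find_decorator_start_py lines func_start_idx → Pre_find_decorator_start_py lines func_start_idx → Spec_find_decorator_start_py lines func_start_idx (find_decorator_start_py lines func_start_idx)

-- ===== LEMMAS AND PROOFS =====

theorem skip_spec (lines : List String) (t : Int) :
    pvSkipBlanksA lines t ≤ t ∧
      (pvSkipBlanksA lines t ≤ 0 ∨
        PySem.Str.strip (PySem.List.pyGetD lines (pvSkipBlanksA lines t - 1) "") ≠ "") := by
  induction hn : t.toNat using Nat.strong_induction_on generalizing t with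
  | _ n IH =>
    rw [pvSkipBlanksA]
    split
    · next h =>
      obtain ⟨h1, h2⟩ := IH (t - 1).toNat (by omega) (t - 1) rfl
      exact ⟨by omega, h2⟩
    · next h =>
      by_cases ht : t > 0
      · exact ⟨le_refl _, Or.inr (fun hb => h ⟨ht, hb⟩)⟩
      · exact ⟨le_refl _, Or.inl (by omega)⟩

theorem startswith_empty_at : PySem.Str.startswith "" "@" = false := by decide

theorem loopB_skip (lines : List String) (t r : Int) :
    pvLoopB lines t r = pvLoopB lines (pvSkipBlanksA lines t) r := by
  induction hn : t.toNat using Nat.strong_induction_on generalizing t with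
  | _ n IH =>
    rw [pvSkipBlanksA]
    split
    · next h =>
      rw [pvLoopB, dif_pos h.1]
      simp only [h.2, startswith_empty_at, if_false, Bool.false_eq_true, if_true]
      exact IH (t - 1).toNat (by omega) (t - 1) rfl
    · rfl

theorem loopA_eq_loopB (lines : List String) (idx : Int) :
    pvLoopA lines idx = pvLoopB lines idx idx := by
  induction hn : idx.toNat using Nat.strong_induction_on generalizing idx with
  | _ n IH =>
    rw [pvLoopA, pvLoopB]
    by_cases h : idx > 0
    · rw [dif_pos h, dif_pos h]
      by_cases hs : PySem.Str.startswith (PySem.Str.strip (PySem.List.pyGetD lines (idx - 1) "")) "@"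
      · simp only [hs, if_true]
        exact IH (idx - 1).toNat (by omega) (idx - 1) rfl
      · simp only [hs, if_false, Bool.false_eq_true]
        by_cases hb : PySem.Str.strip (PySem.List.pyGetD lines (idx - 1) "") = ""
        · simp only [hb]
          have hBskip : pvLoopB lines (idx - 1) idx
              = pvLoopB lines (pvSkipBlanksA lines (idx - 1)) idx := loopB_skip lines (idx - 1) idx
          obtain ⟨hle, hpost⟩ := skip_spec lines (idx - 1)
          set t := pvSkipBlanksA lines (idx - 1) with ht
          by_cases hc : t > 0 ∧ PySem.Str.startswith (PySem.Str.strip (PySem.List.pyGetD lines (t - 1) "")) "@"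
          · rw [if_pos hc, hBskip]
            have e1 : pvLoopB lines t idx = pvLoopB lines (t - 1) (t - 1) := by
              rw [pvLoopB, dif_pos hc.1]; simp only [hc.2, if_true]
            have e2 : pvLoopB lines t t = pvLoopB lines (t - 1) (t - 1) := by
              rw [pvLoopB, dif_pos hc.1]; simp only [hc.2, if_true]
            rw [e1, ← e2]
            exact IH t.toNat (by omega) t rfl
          · rw [if_neg hc, hBskip]
            by_cases htp : t > 0
            · have hnb : PySem.Str.strip (PySem.List.pyGetD lines (t - 1) "") ≠ "" := by
                rcases hpost with hle0 | hnb
                · omega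
                · exact hnb
              have hns : ¬ PySem.Str.startswith (PySem.Str.strip (PySem.List.pyGetD lines (t - 1) "")) "@" = true := by
                intro hx; exact hc ⟨htp, hx⟩
              rw [pvLoopB, dif_pos htp]
              simp only [if_neg hns, if_neg hnb]
            · rw [pvLoopB, dif_neg htp]
        · simp only [if_neg hb]
    · rw [dif_neg h, dif_neg h]

-- ===== VERDICT (by name: the statement is the Claim_ definition above) =====
theorem find_decorator_start_py_spec : Claim_equal_find_decorator_start_py := by
  intro lines f _ _
  unfold Spec_find_decorator_start_py find_decorator_start_py find_decorator_start_py_alt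
  exact loopA_eq_loopB lines f
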